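-- pv_equiv track=rewrite | github.com/eian-lee/coder_five | seoyoung/week4/저울.py | solution
-- ===== SOURCE A (Python) =====
-- def solution(weight):
--     weight.sort()
--     nxt = 1
--     for w in weight:
--         if w > nxt:
--             break;
--         nxt += w
--     return nxt
-- ===== SOURCE B (Python) =====
-- def solution(weight):
--     # Sorts weight in place, like A; equivalence is about the return value.
--     weight.sort()
--     def extend(w, rest):
--         # Prepend one weighing step to the decision chain.
--         return lambda nxt: nxt if w > nxt else rest(nxt + w)
--     chain = lambda nxt: nxt
--     for w in reversed(weight):
--         chain = extend(w, chain)
--     return chain(1)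
-- ===== Notes on version B (the rewrite author's own statement) =====
-- stated objective: alternative
-- what changed: B builds the whole decision procedure back-to-front as a composed continuation (a right fold over the sorted weights producing a function), then evaluates it once at 1, instead of A's forward loop with a running total and a break.
import Mathlib
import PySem

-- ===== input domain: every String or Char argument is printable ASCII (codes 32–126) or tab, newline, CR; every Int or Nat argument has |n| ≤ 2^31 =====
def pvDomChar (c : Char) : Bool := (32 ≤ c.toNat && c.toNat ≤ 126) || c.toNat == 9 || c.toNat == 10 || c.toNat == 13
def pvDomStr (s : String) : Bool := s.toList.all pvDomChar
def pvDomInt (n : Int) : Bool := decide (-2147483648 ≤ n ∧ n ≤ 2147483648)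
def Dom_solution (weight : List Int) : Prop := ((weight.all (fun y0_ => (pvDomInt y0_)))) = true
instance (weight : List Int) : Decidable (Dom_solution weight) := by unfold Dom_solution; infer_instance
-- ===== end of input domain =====

-- B composes the decision chain back-to-front (a right fold producing a continuation) and applies it once,
-- instead of A's forward loop with break. Both Pythons sort the argument in place; equivalence is about the return value.
-- ===== PORT A =====
def solutionLoopA : List Int → Int → Int
  | [], nxt => nxt
  | w :: ws, nxt => if w > nxt then nxt else solutionLoopA ws (nxt + w)

def solution (weight : List Int) : Int :=
  solutionLoopA (PySem.List.sorted weight (fun x => x) false) 1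

-- ===== PORT B =====
-- extend(w, rest) = lambda nxt: nxt if w > nxt else rest(nxt + w)
def solutionExtend (w : Int) (rest : Int → Int) : Int → Int :=
  fun nxt => if w > nxt then nxt else rest (nxt + w)

-- chain = identity; for w in reversed(weight): chain = extend(w, chain)  — i.e. a right fold
def solution_alt (weight : List Int) : Int :=
  let ws := PySem.List.sorted weight (fun x => x) false
  let chain := (ws.reverse).foldl (fun c w => solutionExtend w c) (fun nxt => nxt)
  chain 1

-- ===== PRECONDITION & SPEC =====
def Spec_solution (weight : List Int) (out : Int) : Prop := out = solution_alt weight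
instance (weight : List Int) (out : Int) : Decidable (Spec_solution weight out) := by unfold Spec_solution; infer_instance

-- ===== CLAIM (what is proved, stated in full; the proofs are below) =====
def Claim_equal_solution : Prop := ∀ (weight : List Int), Dom_solution weight → Spec_solution weight (solution weight)

-- ===== LEMMAS AND PROOFS =====

theorem chain_eq_loop (ws : List Int) :
    ∀ nxt, (ws.reverse).foldl (fun c w => solutionExtend w c) (fun n => n) nxt
      = solutionLoopA ws nxt := by
  induction ws with
  | nil => intro nxt; simp [solutionLoopA]
  | cons w rest ih =>
    intro nxt
    rw [List.reverse_cons, List.foldl_append]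
    simp only [List.foldl_cons, List.foldl_nil, solutionExtend, solutionLoopA]
    split
    · rfl
    · exact ih _

-- ===== VERDICT (by name: the statement is the Claim_ definition above) =====
theorem solution_spec : Claim_equal_solution := by
  intro weight _
  unfold Spec_solution solution solution_alt
  exact (chain_eq_loop _ 1).symm
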